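-- pv_equiv track=rewrite | github.com/syntra-vindevoy/python-1-2024 | myenv/Millstone_weights.py | verify_specific_weight
-- ===== SOURCE A (Python) =====
-- def verify_specific_weight(target_weight, pieces=[1, 3, 9, 27]):
--
--
--     def find_combination(target, pieces, used=[], start=0):
--         if target == 0:
--             return used
--         if start >= len(pieces):
--             return None
--
--         # Try adding the piece
--         result = find_combination(target - pieces[start],
--                                   pieces,
--                                   used + [(pieces[start], '+')],
--                                   start + 1)
--         if result:
--             return result
--
--
--         result = find_combination(target + pieces[start],
--                                   pieces,
--                                   used + [(pieces[start], '-')],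
--                                   start + 1)
--         return result
--
--     combination = find_combination(target_weight, sorted(pieces, reverse=True))
--     if combination:
--         equation = f"{target_weight} = "
--         terms = []
--         for piece, op in combination:
--             terms.append(f"{op}{piece}")
--         equation += " ".join(terms)
--         return equation
--     return f"Cannot make {target_weight} kg"
-- ===== SOURCE B (Python) =====
-- def verify_specific_weight(target_weight, pieces=[1, 3, 9, 27]):
--     ps = sorted(pieces, reverse=True)
--     # reach[i] = set of running targets from which 0 is reachable using ps[i:]
--     # (stopping is allowed at any point, so 0 is always in every level)
--     reach = [{0}]
--     for p in reversed(ps):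
--         s = {0}
--         for t in reach[0]:
--             s.add(t + p)
--             s.add(t - p)
--         reach.insert(0, s)
--     if target_weight == 0 or target_weight not in reach[0]:
--         return f"Cannot make {target_weight} kg"
--     terms = []
--     t = target_weight
--     i = 0
--     while t != 0:
--         if t - ps[i] in reach[i + 1]:
--             terms.append(f"+{ps[i]}")
--             t -= ps[i]
--         else:
--             terms.append(f"-{ps[i]}")
--             t += ps[i]
--         i += 1
--     return f"{target_weight} = " + " ".join(terms)
-- ===== Notes on version B (the rewrite author's own statement) =====
-- stated objective: alternative
-- what changed: Replaces A's top-down exponential DFS over sign choices by a bottom-up table of reachable-target sets (one set per suffix of the sorted pieces) followed by a single greedy forward reconstruction that prefers '+', reproducing A's DFS-first answer; on value-dense or duplicate-heavy piece lists the sets collapse and B is much faster, but with n distinct unstructured values both are exponential in the worst case, so no speed is claimed.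
import Mathlib
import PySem

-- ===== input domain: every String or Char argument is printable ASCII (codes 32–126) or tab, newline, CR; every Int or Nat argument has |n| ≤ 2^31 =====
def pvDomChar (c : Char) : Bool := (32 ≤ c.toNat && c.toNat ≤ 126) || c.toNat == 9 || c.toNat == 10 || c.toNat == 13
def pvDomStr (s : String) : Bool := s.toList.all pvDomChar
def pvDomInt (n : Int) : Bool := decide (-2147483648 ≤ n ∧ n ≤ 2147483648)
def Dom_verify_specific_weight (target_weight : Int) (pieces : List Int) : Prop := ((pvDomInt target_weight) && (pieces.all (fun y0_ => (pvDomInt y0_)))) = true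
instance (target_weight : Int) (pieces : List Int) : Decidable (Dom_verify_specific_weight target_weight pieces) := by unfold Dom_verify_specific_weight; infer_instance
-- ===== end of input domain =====

-- B replaces A's exponential sign-DFS by a bottom-up reachable-set table (one set per suffix)
-- followed by a greedy reconstruction preferring '+'; objective: alternative algorithm.


-- ===== PORT A =====

-- Python truthiness of `result` (a list or None): non-None and non-empty
def pvTruthy (r : Option (List (Int × String))) : Bool :=
  match r with
  | some l => !l.isEmpty
  | none => false

-- literal port of A's inner `find_combination(target, pieces, used, start)`
def findComb (pieces : List Int) (target : Int) (used : List (Int × String)) (start : Nat) :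
    Option (List (Int × String)) :=
  if target = 0 then some used
  else if pieces.length ≤ start then none
  else
    let p := pieces.getD start 0   -- pieces[start], index in range
    let r1 := findComb pieces (target - p) (used ++ [(p, "+")]) (start + 1)
    if pvTruthy r1 then r1
    else findComb pieces (target + p) (used ++ [(p, "-")]) (start + 1)
  termination_by pieces.length - start
  decreasing_by all_goals omega

def verify_specific_weight (target_weight : Int) (pieces : List Int) : String :=
  let combination := findComb (PySem.List.sorted pieces (fun x => x) true) target_weight [] 0
  if pvTruthy combination then
    PySem.Int.toStr target_weight ++ " = " ++
      PySem.Str.join " "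
        (((combination.getD []).foldl
            (fun terms po => terms ++ [po.2 ++ PySem.Int.toStr po.1]) []))
  else
    "Cannot make " ++ PySem.Int.toStr target_weight ++ " kg"

-- ===== PORT B =====

-- Source B: reach = [{0}]; for p in reversed(ps): s = {0}; for t in reach[0]: s.add(t+p); s.add(t-p); reach.insert(0, s)
def buildReach (ps : List Int) : List (PySem.Set Int) :=
  ps.foldr
    (fun p reach =>
      ((reach.headD []).foldl
          (fun s t => PySem.Set.add (PySem.Set.add s (t + p)) (t - p))
          (PySem.Set.ofList [0])) :: reach)
    [PySem.Set.ofList [0]]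

-- Source B's while-loop; the final `else` branch is unreachable under the caller's guard (totality only)
def reconstruct (ps : List Int) (reach : List (PySem.Set Int)) (t : Int) (i : Nat)
    (terms : List String) : List String :=
  if t = 0 then terms
  else if ps.length ≤ i then terms
  else
    let p := ps.getD i 0
    if PySem.Set.contains (reach.getD (i + 1) []) (t - p) then
      reconstruct ps reach (t - p) (i + 1) (terms ++ ["+" ++ PySem.Int.toStr p])
    else
      reconstruct ps reach (t + p) (i + 1) (terms ++ ["-" ++ PySem.Int.toStr p])
  termination_by ps.length - i
  decreasing_by all_goals omega

def verify_specific_weight_alt (target_weight : Int) (pieces : List Int) : String :=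
  let ps := PySem.List.sorted pieces (fun x => x) true
  let reach := buildReach ps
  if target_weight = 0 || !(PySem.Set.contains (reach.getD 0 []) target_weight) then
    "Cannot make " ++ PySem.Int.toStr target_weight ++ " kg"
  else
    PySem.Int.toStr target_weight ++ " = " ++
      PySem.Str.join " " (reconstruct ps reach target_weight 0 [])

-- ===== PRECONDITION & SPEC =====
def Spec_verify_specific_weight (target_weight : Int) (pieces : List Int) (out : String) : Prop := out = verify_specific_weight_alt target_weight pieces
instance (target_weight : Int) (pieces : List Int) (out : String) : Decidable (Spec_verify_specific_weight target_weight pieces out) := by unfold Spec_verify_specific_weight; infer_instance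

-- ===== CLAIM (what is proved, stated in full; the proofs are below) =====
def Claim_equal_verify_specific_weight : Prop := ∀ (target_weight : Int) (pieces : List Int), Dom_verify_specific_weight target_weight pieces → Spec_verify_specific_weight target_weight pieces (verify_specific_weight target_weight pieces)

-- ===== LEMMAS AND PROOFS =====

-- proof-side characterisation: can the running target t reach 0 using the suffix r (stopping allowed)?
def feasible : List Int → Int → Bool
  | [], t => t == 0
  | p :: rest, t => t == 0 || feasible rest (t - p) || feasible rest (t + p)

-- the DFS-first ('+' preferred, stop at first zero) sign assignment
def path : List Int → Int → List (Int × String)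
  | [], _ => []
  | p :: rest, t =>
    if t = 0 then []
    else if feasible rest (t - p) then (p, "+") :: path rest (t - p)
    else (p, "-") :: path rest (t + p)

theorem path_zero (r : List Int) : path r 0 = [] := by cases r <;> simp [path]

theorem path_ne_nil (r : List Int) (t : Int) (hf : feasible r t = true) (ht : t ≠ 0) :
    path r t ≠ [] := by
  cases r with
  | nil => simp [feasible, ht] at hf
  | cons p rest => simp [path, ht]; split_ifs <;> simp

theorem feasible_zero (ps : List Int) (i : Nat) : feasible (ps.drop i) 0 = true := by
  cases h : ps.drop i <;> simp [feasible]

theorem findComb_eq (ps : List Int) (i : Nat) (t : Int) (used : List (Int × String)) :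
    findComb ps t used i =
      if feasible (ps.drop i) t then some (used ++ path (ps.drop i) t) else none := by
  by_cases ht : t = 0
  · subst ht; simp [findComb, path_zero, feasible_zero ps i]
  · rw [findComb]
    by_cases hlen : ps.length ≤ i
    · rw [if_neg ht, if_pos hlen, List.drop_eq_nil_of_le hlen]
      simp [feasible, ht]
    · have hi : i < ps.length := by omega
      have hdrop : ps.drop i = ps[i] :: ps.drop (i + 1) :=
        List.drop_eq_getElem_cons hi
      have hp : ps.getD i 0 = ps[i] := by
        simp [List.getD_eq_getElem?_getD, hi]
      rw [if_neg ht, if_neg hlen]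
      simp only [hp]
      rw [findComb_eq ps (i + 1) (t - ps[i]) (used ++ [(ps[i], "+")])]
      rw [hdrop]
      by_cases hplus : feasible (ps.drop (i + 1)) (t - ps[i]) = true
      · simp [hplus, pvTruthy, feasible, path, ht]
      · simp only [hplus]
        rw [findComb_eq ps (i + 1) (t + ps[i]) (used ++ [(ps[i], "-")])]
        simp [pvTruthy, feasible, ht, hplus, path]
  termination_by ps.length - i
  decreasing_by all_goals omega

theorem mem_foldl_add2 (p : Int) (l : List Int) (s0 : PySem.Set Int) (x : Int) :
    x ∈ l.foldl (fun s t => PySem.Set.add (PySem.Set.add s (t + p)) (t - p)) s0 ↔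
      x ∈ s0 ∨ ∃ t ∈ l, x = t + p ∨ x = t - p := by
  induction l generalizing s0 with
  | nil => simp
  | cons a l ih =>
    simp only [List.foldl_cons, ih, PySem.Set.mem_add, List.mem_cons]
    constructor
    · rintro (((h | h) | h) | ⟨t, ht, h⟩)
      · exact Or.inl h
      · exact Or.inr ⟨a, Or.inl rfl, Or.inl h⟩
      · exact Or.inr ⟨a, Or.inl rfl, Or.inr h⟩
      · exact Or.inr ⟨t, Or.inr ht, h⟩
    · rintro (h | ⟨t, (rfl | ht), h⟩)
      · exact Or.inl (Or.inl (Or.inl h))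
      · rcases h with h | h
        · exact Or.inl (Or.inl (Or.inr h))
        · exact Or.inl (Or.inr h)
      · exact Or.inr ⟨t, ht, h⟩

theorem mem_buildReach_head (r : List Int) (x : Int) :
    x ∈ (buildReach r).headD [] ↔ feasible r x = true := by
  induction r generalizing x with
  | nil => simp [buildReach, PySem.Set.mem_ofList, feasible]
  | cons p rest ih =>
    show x ∈ ((buildReach rest).headD []).foldl _ (PySem.Set.ofList [0]) ↔ _
    rw [mem_foldl_add2]
    simp only [PySem.Set.mem_ofList, List.mem_singleton, feasible, Bool.or_eq_true, beq_iff_eq]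
    constructor
    · rintro (h | ⟨t, ht, (h | h)⟩)
      · exact Or.inl (Or.inl h)
      · exact Or.inl (Or.inr ((ih (x - p)).mp (by rwa [h, Int.add_sub_cancel])))
      · exact Or.inr ((ih (x + p)).mp (by rwa [h, Int.sub_add_cancel]))
    · rintro ((h | h) | h)
      · exact Or.inl h
      · exact Or.inr ⟨x - p, (ih (x - p)).mpr h, Or.inl (by ring)⟩
      · exact Or.inr ⟨x + p, (ih (x + p)).mpr h, Or.inr (by ring)⟩

theorem buildReach_drop (ps : List Int) (i : Nat) (h : i ≤ ps.length) :
    (buildReach ps).drop i = buildReach (ps.drop i) := by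
  induction ps generalizing i with
  | nil =>
    have : i = 0 := by simpa using h
    subst this; simp
  | cons p rest ih =>
    cases i with
    | zero => simp
    | succ j =>
      have : (buildReach (p :: rest)).drop (j + 1) = (buildReach rest).drop j := by
        show (_ :: buildReach rest).drop (j + 1) = _
        simp
      rw [this, ih j (by simpa using h)]
      simp

theorem getD_buildReach (ps : List Int) (i : Nat) (h : i ≤ ps.length) :
    (buildReach ps).getD i [] = (buildReach (ps.drop i)).headD [] := by
  rw [List.getD_eq_getElem?_getD, ← List.head?_drop, buildReach_drop ps i h]
  cases hb : buildReach (ps.drop i) <;> simp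

theorem contains_reach (ps : List Int) (i : Nat) (h : i ≤ ps.length) (x : Int) :
    PySem.Set.contains ((buildReach ps).getD i []) x = feasible (ps.drop i) x := by
  rw [getD_buildReach ps i h]
  have hiff := PySem.Set.contains_iff ((buildReach (ps.drop i)).headD []) x
  rw [mem_buildReach_head] at hiff
  exact Bool.eq_iff_iff.mpr hiff

theorem reconstruct_eq (ps : List Int) (i : Nat) (t : Int) (terms : List String)
    (hi : i ≤ ps.length) (hf : feasible (ps.drop i) t = true) :
    reconstruct ps (buildReach ps) t i terms =
      terms ++ (path (ps.drop i) t).map (fun po => po.2 ++ PySem.Int.toStr po.1) := by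
  by_cases ht : t = 0
  · subst ht; rw [reconstruct]; simp [path_zero]
  · have hlt : i < ps.length := by
      by_contra hge
      have : ps.drop i = [] := List.drop_eq_nil_of_le (by omega)
      rw [this] at hf; simp [feasible, ht] at hf
    have hdrop : ps.drop i = ps[i] :: ps.drop (i + 1) := List.drop_eq_getElem_cons hlt
    have hp : ps.getD i 0 = ps[i] := by simp [List.getD_eq_getElem?_getD, hlt]
    rw [reconstruct]
    rw [if_neg ht, if_neg (by omega : ¬ ps.length ≤ i)]
    simp only [hp]
    rw [contains_reach ps (i + 1) (by omega)]
    rw [hdrop] at hf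
    simp only [feasible, Bool.or_eq_true, beq_iff_eq] at hf
    by_cases hplus : feasible (ps.drop (i + 1)) (t - ps[i]) = true
    · rw [hplus, if_pos rfl]
      rw [reconstruct_eq ps (i + 1) (t - ps[i]) _ (by omega) hplus]
      rw [hdrop]
      simp [path, ht, hplus]
    · have hminus : feasible (ps.drop (i + 1)) (t + ps[i]) = true := by
        rcases hf with (hf | hf) | hf
        · exact absurd hf ht
        · exact absurd hf hplus
        · exact hf
      simp only [Bool.not_eq_true] at hplus
      rw [hplus, if_neg (by simp)]
      rw [reconstruct_eq ps (i + 1) (t + ps[i]) _ (by omega) hminus]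
      rw [hdrop]
      simp [path, ht, hplus]
  termination_by ps.length - i
  decreasing_by all_goals omega

-- ===== VERDICT (by name: the statement is the Claim_ definition above) =====
theorem verify_specific_weight_spec : Claim_equal_verify_specific_weight := by
  intro tw pieces _
  show verify_specific_weight tw pieces = verify_specific_weight_alt tw pieces
  unfold verify_specific_weight verify_specific_weight_alt
  set ps := PySem.List.sorted pieces (fun x => x) true with hps
  rw [findComb_eq ps 0 tw []]
  simp only [List.drop_zero, List.nil_append]
  rw [contains_reach ps 0 (by omega) tw, List.drop_zero]
  by_cases hf : feasible ps tw = true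
  · by_cases ht : tw = 0
    · subst ht; simp [pvTruthy, path_zero, hf]
    · have hne := path_ne_nil ps tw hf ht
      rw [reconstruct_eq ps 0 tw [] (by omega) (by simpa using hf)]
      rw [PySem.List.foldl_append_singleton_eq_map]
      simp [pvTruthy, hf, ht, hne]
  · simp only [Bool.not_eq_true] at hf
    simp [hf, pvTruthy]
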